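-- pv_equiv track=rewrite | github.com/Bhanjo/algorithm | programmers/lv2/[1차]프렌즈4블록.py | solution
-- ===== SOURCE A (Python) =====
-- def dropBlock(graph):
--     for y in range(len(graph[0])): # 가로
--         for x in range(len(graph)-2, -1, -1):
--             # 아래로 내릴 수 있을 때 까지
--             for targetX in range(x, len(graph)-1):
--                 if graph[targetX+1][y] != '': break
--                 graph[targetX+1][y] = graph[targetX][y]
--                 graph[targetX][y] = ''
--
-- def solution(m, n, board):
--     answer = 0
--     graph = []
--     dx = [1,0,1]
--     dy = [0,1,1]
--     popList = []
--
--     # 그래프 업데이트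
--     for i in board:
--         i = list(i)
--         graph.append(i)
--
--     # i,j와 같은 그림 3개 찾기
--     def bfs(i,j,icon):
--         cnt = [[i,j]]
--
--         for move in range(3):
--             mx = i + dx[move]
--             my = j + dy[move]
--             if 0 <= mx < m and 0 <= my < n:
--                 # 기준과 같은 캐릭터인가 판별
--                 if graph[mx][my] == icon:
--                     cnt.append([mx,my])
--                 else:
--                     break
--
--         if len(cnt) == 4:
--             popList.extend(cnt)
--
--     while(True):
--         for i in range(m):
--             for j in range(n):
--                 if graph[i][j] != '':
--                     bfs(i,j,graph[i][j])
--         if popList: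
--             popList = list(set(map(tuple,popList)))
--             # 블록 제거
--             while(popList):
--                 x,y = popList.pop()
--                 graph[x][y] = ''
--                 answer += 1
--             dropBlock(graph)
--         else:
--             break
--
--     return answer
-- ===== SOURCE B (Python) =====
-- def solution(m, n, board):
--     grid = [list(r) for r in board]
--     answer = 0
--     while True:
--         hits = set()
--         for i in range(m - 1):
--             for j in range(n - 1):
--                 c = grid[i][j]
--                 if c != '' and c == grid[i][j + 1] and c == grid[i + 1][j] and c == grid[i + 1][j + 1]:
--                     hits.update({(i, j), (i, j + 1), (i + 1, j), (i + 1, j + 1)})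
--         if not hits:
--             return answer
--         answer += len(hits)
--         grid = [['' if (i, j) in hits else grid[i][j] for j in range(n)] for i in range(m)]
--         cols = []
--         for j in range(n):
--             col = [grid[i][j] for i in range(m) if grid[i][j] != '']
--             cols.append([''] * (m - len(col)) + col)
--         grid = [[cols[j][i] for j in range(n)] for i in range(m)]
-- ===== Notes on version B (the rewrite author's own statement) =====
-- stated objective: simpler
-- what changed: Replaces A's per-cell bfs with dx/dy move tables, duplicate-collecting popList plus set dedup, and the in-place bubbling dropBlock with a direct scan that puts each matching 2x2 square's cells straight into a set and a gravity step that rebuilds every column as top-padding plus its non-empty cells.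
-- outside the precondition, e.g. on solution(2, 2, ['aa', 'aa', 'xy']): A returns 4, B returns 4
import Mathlib
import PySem

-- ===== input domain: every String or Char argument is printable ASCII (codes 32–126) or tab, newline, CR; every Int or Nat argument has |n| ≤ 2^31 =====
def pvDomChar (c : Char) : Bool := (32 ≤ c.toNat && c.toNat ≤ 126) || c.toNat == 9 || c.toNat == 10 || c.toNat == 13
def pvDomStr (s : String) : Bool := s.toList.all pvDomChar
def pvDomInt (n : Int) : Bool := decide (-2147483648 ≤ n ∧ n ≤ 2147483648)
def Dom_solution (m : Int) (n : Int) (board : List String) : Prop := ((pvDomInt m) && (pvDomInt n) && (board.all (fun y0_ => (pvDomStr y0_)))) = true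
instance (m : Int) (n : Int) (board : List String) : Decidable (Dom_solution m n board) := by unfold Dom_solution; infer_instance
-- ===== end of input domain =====

-- B removes the 2x2 squares by a direct set-building scan and rebuilds each column for gravity,
-- instead of A's move-table bfs with duplicate list + set dedup and in-place bubbling; same results, no speed claim.

-- ===== PORT A =====

-- graph[i][j] (indices are the loop counters, always ≥ 0; out of range only outside Pre_)
def getC (g : List (List String)) (i j : Nat) : String := (g.getD i []).getD j ""

-- graph[i][j] = v (in range on every Pre_ input; List.set is a no-op out of range)
def setC (g : List (List String)) (i j : Nat) (v : String) : List (List String) :=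
  g.set i ((g.getD i []).set j v)

-- the 'for move in range(3)' loop of bfs: moves (dx,dy) in order, skip when out of bounds,
-- append on match, break (return cnt) on mismatch.  0 ≤ mx / 0 ≤ my hold since indices are Nat.
def bfsMoves (m n : Int) (g : List (List String)) (icon : String) (i j : Nat) :
    List (Nat × Nat) → List (Nat × Nat) → List (Nat × Nat)
  | cnt, [] => cnt
  | cnt, d :: ds =>
      let mx := i + d.1
      let my := j + d.2
      if ((mx : Int) < m ∧ (my : Int) < n) then
        (if getC g mx my = icon then bfsMoves m n g icon i j (cnt ++ [(mx, my)]) ds else cnt)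
      else bfsMoves m n g icon i j cnt ds

-- bfs(i, j, icon): extend popList with cnt when len(cnt) == 4
def bfsA (m n : Int) (g : List (List String)) (i j : Nat) (icon : String)
    (popList : List (Nat × Nat)) : List (Nat × Nat) :=
  let cnt := bfsMoves m n g icon i j [(i, j)] [(1, 0), (0, 1), (1, 1)]
  if cnt.length = 4 then popList ++ cnt else popList

-- the double scan 'for i in range(m): for j in range(n): if graph[i][j] != "": bfs(...)'
def scanA (m n : Int) (g : List (List String)) : List (Nat × Nat) :=
  (List.range m.toNat).foldl (fun pl i =>
    (List.range n.toNat).foldl (fun pl j =>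
      if getC g i j ≠ "" then bfsA m n g i j (getC g i j) pl else pl) pl) []

-- the 'for targetX in range(x, len(graph)-1)' loop of dropBlock, with its break
def bubbleA (g : List (List String)) (y : Nat) : List Nat → List (List String)
  | [] => g
  | t :: ts =>
      if getC g (t + 1) y ≠ "" then g
      else bubbleA (setC (setC g (t + 1) y (getC g t y)) t y "") y ts

-- dropBlock(graph); range(len-2,-1,-1) = (List.range (len-1)).reverse, range(x,len-1) = List.range' x (len-1-x)
def dropBlockA (g : List (List String)) : List (List String) :=
  (List.range (g.headD []).length).foldl (fun g y =>
    ((List.range (g.length - 1)).reverse).foldl (fun g x =>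
      bubbleA g y (List.range' x (g.length - 1 - x))) g) g

-- 'while popList: x,y = popList.pop(); graph[x][y] = ""; answer += 1' — pops from the end,
-- i.e. folds over the reversed list; answer grows by the list's length
def removeA (g : List (List String)) (s : List (Nat × Nat)) : List (List String) :=
  s.reverse.foldl (fun g p => setC g p.1 p.2 "") g

-- the 'while True' loop; fuel m*n+1 suffices on every Pre_ input (each round blanks ≥ 4 cells)
def loopA (m n : Int) : Nat → Int → List (List String) → Int
  | 0, answer, _ => answer
  | fuel + 1, answer, g =>
      let popList := scanA m n g
      if popList ≠ [] then
        let s := PySem.Set.ofList popList   -- list(set(map(tuple, popList))); consumed order-independently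
        loopA m n fuel (answer + (s.length : Int)) (dropBlockA (removeA g s))
      else answer

def solution (m : Int) (n : Int) (board : List String) : Int :=
  let graph := board.foldl (fun g r => g ++ [r.toList.map (fun c => String.ofList [c])]) []
  loopA m n (m.toNat * n.toNat + 1) 0 graph

-- ===== PORT B =====

-- the scan: every cell of each equal non-empty 2x2 square goes into one set
def hitsB (m n : Int) (g : List (List String)) : PySem.Set (Nat × Nat) :=
  (List.range (m.toNat - 1)).foldl (fun s i =>
    (List.range (n.toNat - 1)).foldl (fun s j =>
      let c := getC g i j
      if c ≠ "" ∧ c = getC g i (j + 1) ∧ c = getC g (i + 1) j ∧ c = getC g (i + 1) (j + 1) then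
        PySem.Set.update s [(i, j), (i, j + 1), (i + 1, j), (i + 1, j + 1)]
      else s) s) PySem.Set.empty

-- grid = [['' if (i,j) in hits else grid[i][j] for j in range(n)] for i in range(m)]
def clearB (m n : Int) (hits : PySem.Set (Nat × Nat)) (g : List (List String)) : List (List String) :=
  (List.range m.toNat).map (fun i => (List.range n.toNat).map (fun j =>
    if PySem.Set.contains hits (i, j) then "" else getC g i j))

-- gravity: each column becomes '' padding on top of its non-empty cells, then transpose back
def colB (m : Int) (g : List (List String)) (j : Nat) : List String :=
  ((List.range m.toNat).map (fun i => getC g i j)).filter (fun v => v ≠ "")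

def colsB (m n : Int) (g : List (List String)) : List (List String) :=
  (List.range n.toNat).map (fun j =>
    List.replicate (m.toNat - (colB m g j).length) "" ++ colB m g j)

def gravB (m n : Int) (g : List (List String)) : List (List String) :=
  (List.range m.toNat).map (fun i =>
    (List.range n.toNat).map (fun j => ((colsB m n g).getD j []).getD i ""))

def loopB (m n : Int) : Nat → Int → List (List String) → Int
  | 0, answer, _ => answer
  | fuel + 1, answer, g =>
      let hits := hitsB m n g
      if hits.isEmpty then answer
      else loopB m n fuel (answer + (hits.length : Int)) (gravB m n (clearB m n hits g))

def solution_alt (m : Int) (n : Int) (board : List String) : Int :=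
  loopB m n (m.toNat * n.toNat + 1) 0 (board.map (fun r => r.toList.map (fun c => String.ofList [c])))

-- ===== PRECONDITION & SPEC =====

-- Pre_ excludes boards whose dimensions disagree with m and n (A raises IndexError when the board is
-- smaller than m×n; when it is larger A's gravity also drags stray cells outside the m×n window, an
-- artefact of indexing the full board that B's m×n window does not model).
def Pre_solution (m : Int) (n : Int) (board : List String) : Prop :=
  m ≤ 0 ∨ n ≤ 0 ∨ (m = (board.length : Int) ∧ ∀ r ∈ board, (r.toList.length : Int) = n)
instance (m : Int) (n : Int) (board : List String) : Decidable (Pre_solution m n board) := by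
  unfold Pre_solution; infer_instance

def pvWitness_solution : Int × Int × List String := (2, 2, ["ab", "cd"])

def Spec_solution (m : Int) (n : Int) (board : List String) (out : Int) : Prop := out = solution_alt m n board
instance (m : Int) (n : Int) (board : List String) (out : Int) : Decidable (Spec_solution m n board out) := by unfold Spec_solution; infer_instance

-- ===== CLAIM (what is proved, stated in full; the proofs are below) =====
def Claim_equal_solution : Prop := ∀ (m : Int) (n : Int) (board : List String), Dom_solution m n board → Pre_solution m n board → Spec_solution m n board (solution m n board)

-- ===== LEMMAS AND PROOFS =====

-- ---- proof-only definitions ----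

def ShapeG (M N : Nat) (g : List (List String)) : Prop :=
  g.length = M ∧ ∀ r ∈ g, r.length = N

def colF (g : List (List String)) (j : Nat) : List String := g.map (fun r => r.getD j "")

def quadA (i j : Nat) : List (Nat × Nat) := [(i, j), (i + 1, j), (i, j + 1), (i + 1, j + 1)]

def BlkP (M N : Nat) (g : List (List String)) (i j : Nat) : Prop :=
  i + 1 < M ∧ j + 1 < N ∧ getC g i j ≠ "" ∧ getC g (i + 1) j = getC g i j ∧
    getC g i (j + 1) = getC g i j ∧ getC g (i + 1) (j + 1) = getC g i j

def blkB (M N : Nat) (g : List (List String)) (i j : Nat) : Bool :=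
  decide (i + 1 < M) && decide (j + 1 < N) && (getC g i j != "") &&
    (getC g (i + 1) j == getC g i j) && (getC g i (j + 1) == getC g i j) &&
    (getC g (i + 1) (j + 1) == getC g i j)

lemma blkB_iff {M N : Nat} {g : List (List String)} {i j : Nat} :
    blkB M N g i j = true ↔ BlkP M N g i j := by
  unfold blkB BlkP
  simp [Bool.and_eq_true, decide_eq_true_eq, bne_iff_ne, beq_iff_eq]
  tauto

def gravC (c : List String) : List String :=
  List.replicate (c.length - (c.filter (fun v => v ≠ "")).length) "" ++ c.filter (fun v => v ≠ "")

def sink1 (c : List String) : List Nat → List String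
  | [] => c
  | t :: ts => if c.getD (t + 1) "" ≠ "" then c
               else sink1 ((c.set (t + 1) (c.getD t "")).set t "") ts

-- ---- getC / setC / colF basics ----

lemma length_setC (g : List (List String)) (a b : Nat) (v : String) :
    (setC g a b v).length = g.length := by
  simp [setC]

lemma getD_set' {α : Type} (l : List α) (i j : Nat) (a : α) (d : α) :
    (l.set i a).getD j d = if i = j ∧ i < l.length then a else l.getD j d := by
  rw [List.getD_eq_getElem?_getD, List.getElem?_set]
  by_cases hij : i = j
  · subst hij
    by_cases hi : i < l.length
    · simp [hi]
    · simp [hi, List.getD_eq_getElem?_getD]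
  · simp [hij, List.getD_eq_getElem?_getD]

lemma rows_setC {g : List (List String)} {N : Nat} (h : ∀ r ∈ g, r.length = N)
    (a b : Nat) (v : String) : ∀ r ∈ setC g a b v, r.length = N := by
  intro r hr
  by_cases ha : a < g.length
  · rcases List.mem_or_eq_of_mem_set hr with h' | rfl
    · exact h r h'
    · rw [List.length_set, List.getD_eq_getElem g [] ha]
      exact h _ (List.getElem_mem ha)
  · rw [setC, List.set_eq_of_length_le (by omega)] at hr
    exact h r hr


lemma shape_setC {M N : Nat} {g : List (List String)} (h : ShapeG M N g)
    (a b : Nat) (v : String) : ShapeG M N (setC g a b v) :=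
  ⟨by rw [length_setC]; exact h.1, rows_setC h.2 a b v⟩

lemma getC_eq_colF (g : List (List String)) (i j : Nat) :
    getC g i j = (colF g j).getD i "" := by
  unfold getC colF
  cases h : g[i]? <;>
    simp [List.getD_eq_getElem?_getD, List.getElem?_map, h]


lemma length_colF (g : List (List String)) (j : Nat) : (colF g j).length = g.length := by
  simp [colF]

lemma colF_setC_self {g : List (List String)} {N : Nat} (h : ∀ r ∈ g, r.length = N)
    {b : Nat} (hb : b < N) (a : Nat) (v : String) :
    colF (setC g a b v) b = (colF g b).set a v := by
  unfold colF setC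
  apply List.ext_getElem?
  intro i
  simp only [List.getElem?_map, List.getElem?_set, List.length_map]
  by_cases hai : a = i
  · subst hai
    by_cases ha : a < g.length
    · have hmem := List.getElem_mem ha
      have hlen : b < (g[a]).length := by rw [h _ hmem]; exact hb
      simp [ha, List.getElem?_set_self (by simpa using hlen)]
    · simp [ha]
  · simp [hai]


lemma colF_setC_ne (g : List (List String)) (a b : Nat) (v : String) {j : Nat} (hj : j ≠ b) :
    colF (setC g a b v) j = colF g j := by
  unfold colF setC
  apply List.ext_getElem?
  intro i
  simp only [List.getElem?_map, List.getElem?_set]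
  by_cases hai : a = i
  · subst hai
    by_cases ha : a < g.length
    · simp [ha, List.getD_eq_getElem?_getD, (Ne.symm hj)]
    · simp [ha]
  · simp [hai]


lemma getC_setC_blank (g : List (List String)) (a b i j : Nat) :
    getC (setC g a b "") i j = if i = a ∧ j = b then "" else getC g i j := by
  unfold getC setC
  rw [getD_set' g a i _ []]
  by_cases hai : a = i
  · subst hai
    by_cases ha : a < g.length
    · rw [if_pos ⟨rfl, ha⟩, getD_set']
      by_cases hjb : b = j
      · subst hjb
        by_cases hbl : b < (g.getD a []).length
        · rw [if_pos ⟨rfl, hbl⟩, if_pos ⟨rfl, rfl⟩]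
        · rw [if_neg (by rintro ⟨_, hc⟩; exact hbl hc), if_pos ⟨rfl, rfl⟩,
            List.getD_eq_default _ _ (by omega)]
      · rw [if_neg (by rintro ⟨hc, _⟩; exact hjb hc),
          if_neg (by rintro ⟨_, hc⟩; exact hjb hc.symm)]
    · rw [if_neg (by rintro ⟨_, hc⟩; exact ha hc), List.getD_eq_default g [] (by omega)]
      split <;> rfl
  · rw [if_neg (by rintro ⟨hc, _⟩; exact hai hc), if_neg (by rintro ⟨hc, _⟩; exact hai hc.symm)]


-- ---- characterising A's scan ----

lemma foldl_append_f {α β : Type} (l : List α) (f : α → List β) (init : List β) :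
    l.foldl (fun acc x => acc ++ f x) init = init ++ l.flatMap f := by
  induction l generalizing init with
  | nil => simp
  | cons x xs ih => simp [ih]

lemma bfsA_eq {m n : Int} {g : List (List String)} {i j : Nat}
    (hi : i < m.toNat) (hj : j < n.toNat) (hc : getC g i j ≠ "") (pl : List (Nat × Nat)) :
    bfsA m n g i j (getC g i j) pl =
      pl ++ (if blkB m.toNat n.toNat g i j then quadA i j else []) := by
  have b0 : ((i : Int) < m) := by omega
  have b0' : ((j : Int) < n) := by omega
  by_cases hA : i + 1 < m.toNat
  · have bA : ((i : Int) + 1 < m) := by omega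
    by_cases hB : j + 1 < n.toNat
    · have bB : ((j : Int) + 1 < n) := by omega
      by_cases hq1 : getC g (i + 1) j = getC g i j <;>
        by_cases hq2 : getC g i (j + 1) = getC g i j <;>
          by_cases hq3 : getC g (i + 1) (j + 1) = getC g i j <;>
            simp [bfsA, bfsMoves, blkB, quadA, hA, hB, hq1, hq2, hq3, bA, bB, b0, b0', hc]
    · have bB : ¬ ((j : Int) + 1 < n) := by omega
      by_cases hq1 : getC g (i + 1) j = getC g i j <;>
        simp [bfsA, bfsMoves, blkB, hA, hB, hq1, bA, bB, b0, b0']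
  · have bA : ¬ ((i : Int) + 1 < m) := by omega
    by_cases hB : j + 1 < n.toNat
    · have bB : ((j : Int) + 1 < n) := by omega
      by_cases hq2 : getC g i (j + 1) = getC g i j <;>
        simp [bfsA, bfsMoves, blkB, hA, hB, hq2, bA, bB, b0, b0']
    · have bB : ¬ ((j : Int) + 1 < n) := by omega
      simp [bfsA, bfsMoves, blkB, hA, hB, bA, bB, b0, b0']

lemma scanA_eq (m n : Int) (g : List (List String)) :
    scanA m n g = (List.range m.toNat).flatMap (fun i => (List.range n.toNat).flatMap
      (fun j => if blkB m.toNat n.toNat g i j then quadA i j else [])) := by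
  unfold scanA
  have houter : ∀ pl i, i ∈ List.range m.toNat →
      (List.range n.toNat).foldl (fun pl j =>
        if getC g i j ≠ "" then bfsA m n g i j (getC g i j) pl else pl) pl
      = pl ++ (List.range n.toNat).flatMap
          (fun j => if blkB m.toNat n.toNat g i j then quadA i j else []) := by
    intro pl i hi
    rw [List.mem_range] at hi
    have hbody : ∀ pl j, j ∈ List.range n.toNat →
        (if getC g i j ≠ "" then bfsA m n g i j (getC g i j) pl else pl)
        = pl ++ (if blkB m.toNat n.toNat g i j then quadA i j else []) := by
      intro pl j hj
      rw [List.mem_range] at hj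
      by_cases hc : getC g i j = ""
      · have hB : blkB m.toNat n.toNat g i j = false := by
          simp [blkB, hc]
        simp [hc, hB]
      · rw [if_pos hc, bfsA_eq hi hj hc]
    rw [PySem.List.foldl_congr_mem (List.range n.toNat) _
      (fun pl j => pl ++ (if blkB m.toNat n.toNat g i j then quadA i j else [])) pl
      (fun acc x hx => hbody acc x hx)]
    exact foldl_append_f _ _ _
  rw [PySem.List.foldl_congr_mem (List.range m.toNat) _
    (fun pl i => pl ++ (List.range n.toNat).flatMap
      (fun j => if blkB m.toNat n.toNat g i j then quadA i j else [])) []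
    (fun acc x hx => houter acc x hx)]
  rw [foldl_append_f, List.nil_append]

lemma mem_scanA (m n : Int) (g : List (List String)) (p : Nat × Nat) :
    p ∈ scanA m n g ↔ ∃ i j, BlkP m.toNat n.toNat g i j ∧ p ∈ quadA i j := by
  rw [scanA_eq]
  simp only [List.mem_flatMap, List.mem_range]
  constructor
  · rintro ⟨i, hi, j, hj, hp⟩
    by_cases hB : blkB m.toNat n.toNat g i j = true
    · exact ⟨i, j, blkB_iff.1 hB, by simpa [hB] using hp⟩
    · simp [hB] at hp
  · rintro ⟨i, j, hB, hp⟩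
    exact ⟨i, by have := hB.1; omega, j, by have := hB.2.1; omega,
      by simpa [blkB_iff.2 hB] using hp⟩

-- ---- characterising B's scan ----

lemma mem_foldl_step {α β : Type} (step : List β → α → List β) (Q : α → β → Prop)
    (hstep : ∀ s x y, y ∈ step s x ↔ y ∈ s ∨ Q x y) :
    ∀ (l : List α) (s : List β) (y : β), y ∈ l.foldl step s ↔ y ∈ s ∨ ∃ x ∈ l, Q x y := by
  intro l
  induction l with
  | nil => simp
  | cons x xs ih =>
    intro s y
    simp only [List.foldl_cons, ih, hstep, List.mem_cons]
    constructor
    · rintro ((h | h) | ⟨z, hz, hq⟩)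
      · exact Or.inl h
      · exact Or.inr ⟨x, Or.inl rfl, h⟩
      · exact Or.inr ⟨z, Or.inr hz, hq⟩
    · rintro (h | ⟨z, (rfl | hz), hq⟩)
      · exact Or.inl (Or.inl h)
      · exact Or.inl (Or.inr hq)
      · exact Or.inr ⟨z, hz, hq⟩

lemma nodup_foldl_step {α β : Type} (step : List β → α → List β)
    (hstep : ∀ s x, s.Nodup → (step s x).Nodup) :
    ∀ (l : List α) (s : List β), s.Nodup → (l.foldl step s).Nodup := by
  intro l
  induction l with
  | nil => intro s hs; simpa using hs
  | cons x xs ih => intro s hs; exact ih _ (hstep s x hs)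

lemma mem_hitsB (m n : Int) (g : List (List String)) (p : Nat × Nat) :
    p ∈ hitsB m n g ↔ ∃ i j, BlkP m.toNat n.toNat g i j ∧ p ∈ quadA i j := by
  unfold hitsB
  have hinner : ∀ (i : Nat) (s : List (Nat × Nat)) (y : Nat × Nat),
      y ∈ (List.range (n.toNat - 1)).foldl (fun s j =>
          if getC g i j ≠ "" ∧ getC g i j = getC g i (j + 1) ∧ getC g i j = getC g (i + 1) j ∧
              getC g i j = getC g (i + 1) (j + 1) then
            PySem.Set.update s [(i, j), (i, j + 1), (i + 1, j), (i + 1, j + 1)]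
          else s) s ↔
      y ∈ s ∨ ∃ j ∈ List.range (n.toNat - 1),
        (getC g i j ≠ "" ∧ getC g i j = getC g i (j + 1) ∧ getC g i j = getC g (i + 1) j ∧
          getC g i j = getC g (i + 1) (j + 1)) ∧
        y ∈ [(i, j), (i, j + 1), (i + 1, j), (i + 1, j + 1)] := by
    intro i s y
    refine mem_foldl_step _ (fun j z =>
      (getC g i j ≠ "" ∧ getC g i j = getC g i (j + 1) ∧ getC g i j = getC g (i + 1) j ∧
        getC g i j = getC g (i + 1) (j + 1)) ∧
      z ∈ [(i, j), (i, j + 1), (i + 1, j), (i + 1, j + 1)]) ?_ _ s y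
    intro s' j z
    by_cases hcond : getC g i j ≠ "" ∧ getC g i j = getC g i (j + 1) ∧
        getC g i j = getC g (i + 1) j ∧ getC g i j = getC g (i + 1) (j + 1)
    · simp only [if_pos hcond, PySem.Set.mem_update]
      tauto
    · rw [if_neg hcond]
      tauto
  rw [mem_foldl_step _ (fun i y => ∃ j ∈ List.range (n.toNat - 1),
      (getC g i j ≠ "" ∧ getC g i j = getC g i (j + 1) ∧ getC g i j = getC g (i + 1) j ∧
        getC g i j = getC g (i + 1) (j + 1)) ∧
      y ∈ [(i, j), (i, j + 1), (i + 1, j), (i + 1, j + 1)])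
    (fun s i y => hinner i s y)]
  simp only [PySem.Set.empty, List.not_mem_nil, false_or, List.mem_range]
  constructor
  · rintro ⟨i, hi, j, hj, hcond, hp⟩
    refine ⟨i, j, ⟨by omega, by omega, hcond.1, (hcond.2.2.1).symm, (hcond.2.1).symm,
      (hcond.2.2.2).symm⟩, ?_⟩
    simp only [quadA, List.mem_cons, List.not_mem_nil, or_false] at hp ⊢
    tauto
  · rintro ⟨i, j, ⟨hiM, hjN, hc, h1, h2, h3⟩, hp⟩
    refine ⟨i, by omega, j, by omega, ⟨hc, h2.symm, h1.symm, h3.symm⟩, ?_⟩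
    simp only [quadA, List.mem_cons, List.not_mem_nil, or_false] at hp ⊢
    tauto

lemma nodup_hitsB (m n : Int) (g : List (List String)) : (hitsB m n g).Nodup := by
  unfold hitsB
  apply nodup_foldl_step
  · intro s i hs
    apply nodup_foldl_step
    · intro s' j hs'
      show List.Nodup (if getC g i j ≠ "" ∧ getC g i j = getC g i (j + 1) ∧
          getC g i j = getC g (i + 1) j ∧ getC g i j = getC g (i + 1) (j + 1) then
          PySem.Set.update s' [(i, j), (i, j + 1), (i + 1, j), (i + 1, j + 1)] else s')
      split
      · exact PySem.Set.nodup_update _ _ hs'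
      · exact hs'
    · exact hs
  · exact List.nodup_nil

-- ---- the two hit sets agree ----

lemma mem_setA_iff_hitsB (m n : Int) (g : List (List String)) (p : Nat × Nat) :
    p ∈ PySem.Set.ofList (scanA m n g) ↔ p ∈ hitsB m n g := by
  rw [PySem.Set.mem_ofList, mem_scanA, mem_hitsB]

lemma length_setA_eq_hitsB (m n : Int) (g : List (List String)) :
    (PySem.Set.ofList (scanA m n g)).length = (hitsB m n g).length := by
  exact ((List.perm_ext_iff_of_nodup (PySem.Set.nodup_ofList _) (nodup_hitsB m n g)).2
    (mem_setA_iff_hitsB m n g)).length_eq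

lemma scanA_nil_iff (m n : Int) (g : List (List String)) :
    scanA m n g = [] ↔ (hitsB m n g).isEmpty := by
  rw [List.isEmpty_iff, List.eq_nil_iff_forall_not_mem, List.eq_nil_iff_forall_not_mem]
  constructor
  · intro h p hp
    exact h p ((mem_scanA m n g p).2 ((mem_hitsB m n g p).1 hp))
  · intro h p hp
    exact h p ((mem_hitsB m n g p).2 ((mem_scanA m n g p).1 hp))

-- ---- removal agrees ----

lemma getC_foldl_set (L : List (Nat × Nat)) : ∀ (g : List (List String)) (i j : Nat),
    getC (L.foldl (fun g p => setC g p.1 p.2 "") g) i j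
      = if (i, j) ∈ L then "" else getC g i j := by
  induction L with
  | nil => simp
  | cons p L ih =>
    intro g i j
    rw [List.foldl_cons, ih, getC_setC_blank]
    by_cases hL : (i, j) ∈ L
    · simp [hL]
    · by_cases hp : (i, j) = p
      · obtain ⟨hc1, hc2⟩ : i = p.1 ∧ j = p.2 := by cases p; cases hp; exact ⟨rfl, rfl⟩
        simp [hc1, hc2]
      · have hc : ¬(i = p.1 ∧ j = p.2) := by
          rintro ⟨h1, h2⟩
          exact hp (by cases p; simp_all)
        simp [hL, hp, hc]

lemma getC_removeA (g : List (List String)) (s : List (Nat × Nat)) (i j : Nat) :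
    getC (removeA g s) i j = if (i, j) ∈ s then "" else getC g i j := by
  unfold removeA
  rw [getC_foldl_set]
  simp [List.mem_reverse]

lemma shape_foldl_set {M N : Nat} (L : List (Nat × Nat)) : ∀ {g : List (List String)},
    ShapeG M N g → ShapeG M N (L.foldl (fun g p => setC g p.1 p.2 "") g) := by
  induction L with
  | nil => intro g h; exact h
  | cons p L ih => intro g h; exact ih (shape_setC h p.1 p.2 "")

lemma shape_removeA {M N : Nat} {g : List (List String)} (h : ShapeG M N g)
    (s : List (Nat × Nat)) : ShapeG M N (removeA g s) :=
  shape_foldl_set s.reverse h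

lemma shape_clearB (m n : Int) (hits : PySem.Set (Nat × Nat)) (g : List (List String)) :
    ShapeG m.toNat n.toNat (clearB m n hits g) := by
  constructor
  · simp [clearB]
  · intro r hr
    simp only [clearB, List.mem_map] at hr
    obtain ⟨i, _, rfl⟩ := hr
    simp

lemma getD_map_range {α : Type} (f : Nat → α) (M i : Nat) (hi : i < M) (d : α) :
    ((List.range M).map f).getD i d = f i := by
  rw [List.getD_eq_getElem _ d (by simpa using hi)]
  simp

lemma getC_clearB (m n : Int) (hits : PySem.Set (Nat × Nat)) (g : List (List String))
    {i j : Nat} (hi : i < m.toNat) (hj : j < n.toNat) :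
    getC (clearB m n hits g) i j = if (i, j) ∈ hits then "" else getC g i j := by
  have h1 : getC (clearB m n hits g) i j
      = if PySem.Set.contains hits (i, j) then "" else getC g i j := by
    unfold clearB getC
    rw [getD_map_range _ _ _ hi, getD_map_range _ _ _ hj]
  rw [h1]
  by_cases hm : (i, j) ∈ hits
  · rw [if_pos hm, if_pos ((PySem.Set.contains_iff (s := hits) (x := (i, j))).2 hm)]
  · rw [if_neg hm,
      if_neg (fun hc => hm ((PySem.Set.contains_iff (s := hits) (x := (i, j))).1 hc))]

lemma getC_in_range {g : List (List String)} {i j : Nat} (hi : i < g.length)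
    (hj : j < (g[i]).length) : getC g i j = g[i][j] := by
  unfold getC
  rw [List.getD_eq_getElem g [] hi, List.getD_eq_getElem _ "" hj]

lemma grids_eq {M N : Nat} {g h : List (List String)} (hg : ShapeG M N g) (hh : ShapeG M N h)
    (hsame : ∀ i j, i < M → j < N → getC g i j = getC h i j) : g = h := by
  apply List.ext_getElem (by rw [hg.1, hh.1])
  intro i h1 h2
  apply List.ext_getElem
  · rw [hg.2 _ (List.getElem_mem h1), hh.2 _ (List.getElem_mem h2)]
  · intro j hj1 hj2
    have hiM : i < M := by rw [← hg.1]; exact h1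
    have hjN : j < N := by rw [← hg.2 _ (List.getElem_mem h1)]; exact hj1
    rw [← getC_in_range h1 hj1, ← getC_in_range h2 hj2]
    exact hsame i j hiM hjN

lemma remove_eq_clear {m n : Int} {g : List (List String)} (hs : ShapeG m.toNat n.toNat g) :
    removeA g (PySem.Set.ofList (scanA m n g)) = clearB m n (hitsB m n g) g := by
  apply grids_eq (shape_removeA hs _) (shape_clearB m n _ g)
  intro i j hi hj
  rw [getC_removeA, getC_clearB m n _ g hi hj]
  by_cases hm : (i, j) ∈ PySem.Set.ofList (scanA m n g)
  · rw [if_pos hm, if_pos ((mem_setA_iff_hitsB m n g _).1 hm)]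
  · rw [if_neg hm, if_neg (fun hc => hm ((mem_setA_iff_hitsB m n g _).2 hc))]

-- ---- 1-D gravity ----

lemma length_gravC (c : List String) : (gravC c).length = c.length := by
  have hle := List.length_filter_le (fun v => v ≠ "") c
  rw [gravC, List.length_append, List.length_replicate]; omega

lemma filter_gravC (c : List String) :
    (gravC c).filter (fun v => v ≠ "") = c.filter (fun v => v ≠ "") := by
  rw [gravC, List.filter_append]
  have h1 : (List.replicate (c.length - (c.filter (fun v => v ≠ "")).length) "").filter
      (fun v => v ≠ "") = [] := by
    apply List.filter_eq_nil_iff.2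
    intro a ha
    simp [List.eq_of_mem_replicate ha]
  have h2 : (c.filter (fun v => v ≠ "")).filter (fun v => v ≠ "") = c.filter (fun v => v ≠ "") := by
    apply List.filter_eq_self.2
    intro a ha
    exact (List.mem_filter.1 ha).2
  rw [h1, h2, List.nil_append]

lemma gravC_congr {c d : List String} (hl : c.length = d.length)
    (hf : c.filter (fun v => v ≠ "") = d.filter (fun v => v ≠ "")) : gravC c = gravC d := by
  unfold gravC; rw [hl, hf]

lemma gravC_gravC (c : List String) : gravC (gravC c) = gravC c := by
  have := gravC_congr (length_gravC c) (filter_gravC c)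
  exact this

lemma gravC_small (c : List String) (h : c.length ≤ 1) : gravC c = c := by
  match c, h with
  | [], _ => rfl
  | [a], _ =>
    by_cases ha : a = ""
    · subst ha; simp [gravC]
    · simp [gravC, ha]

lemma gravC_cons_settled {nes : List String} (hne : ∀ s ∈ nes, s ≠ "") (v : String) :
    gravC (v :: nes) = v :: nes := by
  have hf : List.filter (fun v => v ≠ "") nes = nes :=
    List.filter_eq_self.2 (fun a ha => by simpa using hne a ha)
  unfold gravC
  rw [List.filter_cons]
  by_cases hv : v = ""
  · subst hv
    rw [if_neg (by simp), hf]
    rw [show ("" :: nes).length - nes.length = 1 by simp]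
    rfl
  · rw [if_pos (by simp [hv]), hf]
    rw [show (v :: nes).length - (v :: nes).length = 0 by omega]
    rfl

lemma gravC_cons_cons_blank (v : String) (rest : List String) :
    gravC (v :: "" :: rest) = "" :: gravC (v :: rest) := by
  have hf : (v :: "" :: rest).filter (fun v => v ≠ "") = (v :: rest).filter (fun v => v ≠ "") := by
    simp [List.filter_cons]
  have hle := List.length_filter_le (fun v => v ≠ "") (v :: rest)
  unfold gravC
  rw [hf]
  have hlen : (v :: "" :: rest).length = (v :: rest).length + 1 := by simp
  rw [hlen]
  have hstep : (v :: rest).length + 1 - ((v :: rest).filter (fun v => v ≠ "")).length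
      = ((v :: rest).length - ((v :: rest).filter (fun v => v ≠ "")).length) + 1 := by omega
  rw [hstep, List.replicate_succ, List.cons_append]

lemma sink1_spec : ∀ (e : Nat) (c : List String) (x : Nat) (nes : List String),
    x < c.length → c.drop (x + 1) = List.replicate e "" ++ nes → (∀ s ∈ nes, s ≠ "") →
    sink1 c (List.range' x (c.length - 1 - x)) = c.take x ++ gravC (c.drop x) := by
  intro e
  induction e with
  | zero =>
    intro c x nes hx hd hne
    rw [List.replicate_zero, List.nil_append] at hd
    have hdx : c.drop x = (c)[x] :: nes := by
      rw [List.drop_eq_getElem_cons hx, hd]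
    have hdlen : (c.drop x).length = c.length - x := by simp
    match nes, hd, hne with
    | [], hd, _ =>
      have hcx : c.length = x + 1 := by
        have := congrArg List.length hd
        simp at this
        omega
      have hcount : c.length - 1 - x = 0 := by omega
      rw [hcount]
      show c = c.take x ++ gravC (c.drop x)
      rw [gravC_small _ (by rw [hdx]; simp), List.take_append_drop]
    | w :: nes', hd, hne =>
      have hlen2 : c.length - (x + 1) = nes'.length + 1 := by
        have := congrArg List.length hd
        simp at this
        omega
      have hcount : c.length - 1 - x = nes'.length + 1 := by omega
      rw [hcount, List.range'_succ]
      show sink1 c (x :: List.range' (x + 1) nes'.length) = _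
      have hx1 : x + 1 < c.length := by omega
      have h0 : c.getD (x + 1) "" = (c.drop (x + 1)).getD 0 "" := by
        rw [List.getD_eq_getElem _ _ hx1, List.getD_eq_getElem _ _ (by simp; omega)]
        simp [List.getElem_drop]
      have hget : c.getD (x + 1) "" = w := by rw [h0, hd]; rfl
      have hw : w ≠ "" := hne w (by simp)
      rw [sink1, if_pos (by rw [hget]; exact hw)]
      rw [hdx, gravC_cons_settled hne, ← hdx, List.take_append_drop]
  | succ e ih =>
    intro c x nes hx hd hne
    have hx1 : x + 1 < c.length := by
      have := congrArg List.length hd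
      simp at this
      omega
    have hcount : c.length - 1 - x = (c.length - 1 - (x + 1)) + 1 := by omega
    rw [hcount, List.range'_succ]
    have hget1 : c.getD (x + 1) "" = "" := by
      have h0 : c.getD (x + 1) "" = (c.drop (x + 1)).getD 0 "" := by
        rw [List.getD_eq_getElem _ _ hx1, List.getD_eq_getElem _ _ (by simp; omega)]
        simp [List.getElem_drop]
      rw [h0, hd, List.replicate_succ]
      rfl
    rw [sink1, if_neg (by rw [hget1]; simp)]
    set v := c.getD x "" with hv
    set c' := (c.set (x + 1) v).set x "" with hc'
    have lc' : c'.length = c.length := by simp [hc']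
    have hd' : c'.drop (x + 1 + 1) = List.replicate e "" ++ nes := by
      have h1 : c'.drop (x + 2) = c.drop (x + 2) := by
        rw [hc', List.drop_set, if_pos (by omega), List.drop_set, if_pos (by omega)]
      have h2 : c.drop (x + 2) = List.replicate e "" ++ nes := by
        have := congrArg (List.drop 1) hd
        rw [List.drop_drop] at this
        simpa [List.replicate_succ] using this
      rw [show x + 1 + 1 = x + 2 from rfl, h1, h2]
    have := ih c' (x + 1) nes (by omega) hd' hne
    rw [show c.length - 1 - (x + 1) = c'.length - 1 - (x + 1) by omega]
    rw [this]
    -- c'.take (x+1) = c.take x ++ [""]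
    have htake : c'.take (x + 1) = c.take x ++ [""] := by
      rw [hc', List.take_set, List.take_set,
        List.set_eq_of_length_le (l := c.take (x + 1)) (by simp)]
      rw [List.take_add_one]
      rw [List.set_append_right x "" (by simp)]
      congr 1
      · have : (c.take x).length = x := by simp; omega
        rw [List.getElem?_eq_getElem hx]
        simp [this]
    -- c'.drop (x+1) = v :: (replicate e "" ++ nes)
    have hdrop : c'.drop (x + 1) = v :: (List.replicate e "" ++ nes) := by
      rw [hc', List.drop_set, if_pos (by omega), List.drop_set, if_neg (by omega)]
      rw [hd]
      simp [List.replicate_succ]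
    rw [htake, hdrop]
    have hdx : c.drop x = v :: "" :: (List.replicate e "" ++ nes) := by
      rw [List.drop_eq_getElem_cons hx, hd, List.replicate_succ, hv,
        List.getD_eq_getElem _ _ hx]
      rfl
    rw [hdx, gravC_cons_cons_blank]
    simp

lemma fold_sink1_spec : ∀ (j : Nat) (c : List String), j < c.length →
    c.drop j = gravC (c.drop j) →
    ((List.range j).reverse).foldl (fun c x => sink1 c (List.range' x (c.length - 1 - x))) c
      = gravC c := by
  intro j
  induction j with
  | zero =>
    intro c _ hset
    simpa using hset
  | succ j ih =>
    intro c hj hset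
    rw [List.range_succ, List.reverse_append]
    simp only [List.reverse_cons, List.reverse_nil, List.nil_append, List.cons_append,
      List.foldl_cons]
    have hjc : j < c.length := by omega
    -- the settled suffix decomposes as blanks ++ non-blanks
    have hdec : c.drop (j + 1) = List.replicate ((c.drop (j + 1)).length -
        ((c.drop (j + 1)).filter (fun v => v ≠ "")).length) "" ++
        (c.drop (j + 1)).filter (fun v => v ≠ "") := hset
    have hne : ∀ s ∈ (c.drop (j + 1)).filter (fun v => v ≠ ""), s ≠ "" := by
      intro s hs
      simpa using (List.mem_filter.1 hs).2
    have h1 := sink1_spec _ c j _ hjc hdec hne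
    rw [h1]
    set c1 := c.take j ++ gravC (c.drop j) with hc1
    have hlen1 : c1.length = c.length := by
      rw [hc1, List.length_append, length_gravC, List.length_take, List.length_drop]
      omega
    have htk : (c.take j).length = j := by rw [List.length_take]; omega
    have hd1 : c1.drop j = gravC (c.drop j) := by
      rw [hc1, List.drop_left' htk]
    have hset1 : c1.drop j = gravC (c1.drop j) := by
      rw [hd1, gravC_gravC]
    have := ih c1 (by omega) hset1
    rw [this]
    apply gravC_congr hlen1
    rw [hc1, List.filter_append, filter_gravC, ← List.filter_append, List.take_append_drop]

-- ---- lifting gravity to the grid ----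

lemma colF_bubbleA {N : Nat} {g : List (List String)} (h : ∀ r ∈ g, r.length = N)
    {y : Nat} (hy : y < N) (ts : List Nat) :
    colF (bubbleA g y ts) y = sink1 (colF g y) ts ∧
    (∀ j, j ≠ y → colF (bubbleA g y ts) j = colF g j) ∧
    (bubbleA g y ts).length = g.length ∧ (∀ r ∈ bubbleA g y ts, r.length = N) := by
  induction ts generalizing g with
  | nil => exact ⟨rfl, fun _ _ => rfl, rfl, h⟩
  | cons t ts ih =>
    rw [bubbleA, sink1, ← getC_eq_colF]
    by_cases hc : getC g (t + 1) y ≠ ""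
    · rw [if_pos hc, if_pos hc]
      exact ⟨rfl, fun _ _ => rfl, rfl, h⟩
    · rw [if_neg hc, if_neg hc]
      set g' := setC (setC g (t + 1) y (getC g t y)) t y "" with hg'
      have hrows' : ∀ r ∈ g', r.length = N := rows_setC (rows_setC h _ _ _) _ _ _
      have hcol' : colF g' y = ((colF g y).set (t + 1) ((colF g y).getD t "")).set t "" := by
        rw [hg', colF_setC_self (rows_setC h _ _ _) hy, colF_setC_self h hy, getC_eq_colF]
      obtain ⟨h1, h2, h3, h4⟩ := ih hrows'
      refine ⟨?_, ?_, ?_, h4⟩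
      · rw [h1, hcol']
      · intro j hj
        rw [h2 j hj, hg', colF_setC_ne _ _ _ _ hj, colF_setC_ne _ _ _ _ hj]
      · rw [h3, hg', length_setC, length_setC]

-- one y-iteration of dropBlock (the x-fold) performs 1-D gravity on column y
lemma procY_spec {M N : Nat} : ∀ (xs : List Nat) {g : List (List String)} {y : Nat},
    ShapeG M N g → y < N →
    colF (xs.foldl (fun g x => bubbleA g y (List.range' x (g.length - 1 - x))) g) y
      = xs.foldl (fun c x => sink1 c (List.range' x (c.length - 1 - x))) (colF g y) ∧
    (∀ j, j ≠ y → colF (xs.foldl (fun g x => bubbleA g y (List.range' x (g.length - 1 - x))) g) j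
      = colF g j) ∧
    ShapeG M N (xs.foldl (fun g x => bubbleA g y (List.range' x (g.length - 1 - x))) g) := by
  intro xs
  induction xs with
  | nil => intro g y hs hy; exact ⟨rfl, fun _ _ => rfl, hs⟩
  | cons x xs ih =>
    intro g y hs hy
    simp only [List.foldl_cons]
    obtain ⟨b1, b2, b3, b4⟩ := colF_bubbleA hs.2 hy (List.range' x (g.length - 1 - x))
    set g1 := bubbleA g y (List.range' x (g.length - 1 - x)) with hg1
    have hs1 : ShapeG M N g1 := ⟨by rw [b3, hs.1], b4⟩
    obtain ⟨c1, c2, c3⟩ := ih hs1 hy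
    refine ⟨?_, ?_, c3⟩
    · rw [c1, b1, length_colF]
    · intro j hj
      rw [c2 j hj, b2 j hj]

lemma dropBlockA_spec {M N : Nat} {g : List (List String)} (hs : ShapeG M N g) (hM : 0 < M) :
    ShapeG M N (dropBlockA g) ∧ ∀ j, j < N → colF (dropBlockA g) j = gravC (colF g j) := by
  unfold dropBlockA
  have hhead : (g.headD []).length = N := by
    match g, hs.1 with
    | r :: g', _ => exact hs.2 r (by simp)
    | [], h => simp at h; omega
  rw [hhead]
  -- fold over the columns
  have main : ∀ (ys : List Nat) (g : List (List String)), ShapeG M N g → ys.Nodup →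
      (∀ y ∈ ys, y < N) →
      ShapeG M N (ys.foldl (fun g y => ((List.range (g.length - 1)).reverse).foldl
        (fun g x => bubbleA g y (List.range' x (g.length - 1 - x))) g) g) ∧
      ∀ j, j < N → colF (ys.foldl (fun g y => ((List.range (g.length - 1)).reverse).foldl
        (fun g x => bubbleA g y (List.range' x (g.length - 1 - x))) g) g) j
        = (if j ∈ ys then gravC (colF g j) else colF g j) := by
    intro ys
    induction ys with
    | nil => intro g hsg _ _; exact ⟨hsg, fun j _ => by simp⟩
    | cons y ys ih =>
      intro g hsg hnd hlt
      simp only [List.foldl_cons]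
      obtain ⟨p1, p2, p3⟩ := procY_spec ((List.range (g.length - 1)).reverse) hsg
        (hlt y (by simp))
      set g1 := ((List.range (g.length - 1)).reverse).foldl
        (fun g x => bubbleA g y (List.range' x (g.length - 1 - x))) g with hg1
      have hcol : colF g1 y = gravC (colF g y) := by
        rw [p1]
        rw [hsg.1]
        have hlen : (colF g y).length = M := by rw [length_colF, hsg.1]
        have hsettle : (colF g y).drop (M - 1) = gravC ((colF g y).drop (M - 1)) := by
          rw [gravC_small _ (by simp [hlen]; omega)]
        rw [show (List.range (M - 1)) = List.range ((colF g y).length - 1) by rw [hlen]]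
        exact fold_sink1_spec ((colF g y).length - 1) (colF g y) (by omega) (by
          rw [hlen] at *; exact hsettle)
      obtain ⟨q1, q2⟩ := ih g1 p3 hnd.of_cons (fun z hz => hlt z (by simp [hz]))
      refine ⟨q1, ?_⟩
      intro j hj
      rw [q2 j hj]
      by_cases hjy : j = y
      · subst hjy
        have hnin : j ∉ ys := by
          intro hc
          exact (List.nodup_cons.1 hnd).1 hc
        rw [if_neg hnin, if_pos (by simp), hcol]
      · rw [p2 j hjy]
        by_cases hin : j ∈ ys
        · rw [if_pos hin, if_pos (by simp [hin])]
        · rw [if_neg hin, if_neg (by simp [hjy, hin])]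
  obtain ⟨r1, r2⟩ := main (List.range N) g hs (List.nodup_range) (by simp)
  refine ⟨r1, ?_⟩
  intro j hj
  rw [r2 j hj, if_pos (by simpa using hj)]

lemma colF_range (g : List (List String)) (j : Nat) :
    (List.range g.length).map (fun i => getC g i j) = colF g j := by
  apply List.ext_getElem (by simp [colF])
  intro i h1 h2
  have hi : i < g.length := by simpa using h1
  simp only [List.getElem_map, List.getElem_range, colF]
  rw [getC, List.getD_eq_getElem g [] hi]

lemma shape_gravB (m n : Int) (g : List (List String)) : ShapeG m.toNat n.toNat (gravB m n g) := by
  constructor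
  · simp [gravB]
  · intro r hr
    simp only [gravB, List.mem_map] at hr
    obtain ⟨i, _, rfl⟩ := hr
    simp

lemma getC_gravB (m n : Int) (g : List (List String)) (hg : g.length = m.toNat)
    {i j : Nat} (hi : i < m.toNat) (hj : j < n.toNat) :
    getC (gravB m n g) i j = (gravC (colF g j)).getD i "" := by
  unfold gravB getC
  rw [getD_map_range _ _ _ hi, getD_map_range _ _ _ hj]
  unfold colsB
  rw [getD_map_range _ _ _ hj]
  congr 1
  unfold colB
  rw [show List.range m.toNat = List.range g.length by rw [hg], colF_range]
  rw [gravC, length_colF, hg]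

lemma drop_eq_grav {m n : Int} {g : List (List String)}
    (hs : ShapeG m.toNat n.toNat g) (hM : 0 < m.toNat) : dropBlockA g = gravB m n g := by
  obtain ⟨d1, d2⟩ := dropBlockA_spec hs hM
  apply grids_eq d1 (shape_gravB m n g)
  intro i j hi hj
  rw [getC_eq_colF, d2 j hj, getC_gravB m n g hs.1 hi hj]

-- ---- the main loop ----

lemma loops_eq (m n : Int) : ∀ (fuel : Nat) (ans : Int) (g : List (List String)),
    ShapeG m.toNat n.toNat g → loopA m n fuel ans g = loopB m n fuel ans g := by
  intro fuel
  induction fuel with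
  | zero => intro ans g _; rfl
  | succ fuel ih =>
    intro ans g hs
    rw [loopA, loopB]
    by_cases hp : scanA m n g = []
    · rw [if_neg (by simpa using hp), if_pos ((scanA_nil_iff m n g).1 hp)]
    · have hne : ¬ (hitsB m n g).isEmpty := fun hc => hp ((scanA_nil_iff m n g).2 hc)
      rw [if_pos hp, if_neg hne]
      have hM : 0 < m.toNat := by
        obtain ⟨p, hpmem⟩ := List.exists_mem_of_ne_nil _ hp
        obtain ⟨i, j, hB, _⟩ := (mem_scanA m n g p).1 hpmem
        have := hB.1
        omega
      have hlen := length_setA_eq_hitsB m n g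
      show loopA m n fuel (ans + ((PySem.Set.ofList (scanA m n g)).length : Int))
          (dropBlockA (removeA g (PySem.Set.ofList (scanA m n g)))) = _
      rw [hlen]
      rw [remove_eq_clear hs]
      have hs2 : ShapeG m.toNat n.toNat (clearB m n (hitsB m n g) g) :=
        shape_clearB m n (hitsB m n g) g
      rw [drop_eq_grav hs2 hM]
      exact ih _ _ (shape_gravB m n _)

lemma scanA_degenerate (m n : Int) (hmn : m ≤ 0 ∨ n ≤ 0) (g : List (List String)) :
    scanA m n g = [] := by
  rw [List.eq_nil_iff_forall_not_mem]
  intro p hp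
  obtain ⟨i, j, hB, _⟩ := (mem_scanA m n g p).1 hp
  have h1 := hB.1
  have h2 := hB.2.1
  omega

lemma degenerate_eq (m n : Int) (hmn : m ≤ 0 ∨ n ≤ 0) (fuel : Nat) (ans : Int)
    (g g' : List (List String)) : loopA m n fuel ans g = loopB m n fuel ans g' := by
  cases fuel with
  | zero => rfl
  | succ fuel =>
    rw [loopA, loopB]
    rw [if_neg (by simpa using scanA_degenerate m n hmn g),
      if_pos ((scanA_nil_iff m n g').1 (scanA_degenerate m n hmn g'))]


-- ===== VERDICT (by name: the statement is the Claim_ definition above) =====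
theorem solution_spec : Claim_equal_solution := by
  intro m n board _ hpre
  unfold Spec_solution solution solution_alt
  rw [PySem.List.foldl_append_singleton_eq_map]
  simp only [List.nil_append]
  rcases hpre with h | h | ⟨hm, hrows⟩
  · exact degenerate_eq m n (Or.inl h) _ _ _ _
  · exact degenerate_eq m n (Or.inr h) _ _ _ _
  · apply loops_eq
    constructor
    · rw [List.length_map]; omega
    · intro r hr
      simp only [List.mem_map] at hr
      obtain ⟨s, hs, rfl⟩ := hr
      have := hrows s hs
      rw [List.length_map]; omega
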